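-- pv_equiv track=rewrite | github.com/wukong930/Zeus | backend/app/services/learning/drift_monitor.py | regime_switch_count
-- ===== SOURCE A (Python) =====
-- def regime_switch_count(regimes: list[str]) -> int:
--     switches = 0
--     previous: str | None = None
--     for regime in regimes:
--         if not regime:
--             continue
--         if previous is not None and regime != previous:
--             switches += 1
--         previous = regime
--     return switches
-- ===== SOURCE B (Python) =====
-- def regime_switch_count(regimes: list[str]) -> int:
--     # Different characterization: a switch happens exactly at each boundary between
--     # maximal runs of equal non-empty regimes (empty strings are transparent),
--     # so the answer is (number of runs) - 1, clamped at 0.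
--     runs = 0
--     i = 0
--     n = len(regimes)
--     while i < n:
--         if not regimes[i]:
--             i += 1
--             continue
--         runs += 1
--         cur = regimes[i]
--         i += 1
--         while i < n and (not regimes[i] or regimes[i] == cur):
--             i += 1
--     return runs - 1 if runs else 0
-- ===== Notes on version B (the rewrite author's own statement) =====
-- stated objective: alternative
-- what changed: Replaces A's single stateful pass comparing each non-empty element with a tracked 'previous' by a run-counting algorithm: an index-based scan with a nested inner while that skips each maximal run of equal/empty elements, counting runs and returning runs-1 clamped at 0.
import Mathlib
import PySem

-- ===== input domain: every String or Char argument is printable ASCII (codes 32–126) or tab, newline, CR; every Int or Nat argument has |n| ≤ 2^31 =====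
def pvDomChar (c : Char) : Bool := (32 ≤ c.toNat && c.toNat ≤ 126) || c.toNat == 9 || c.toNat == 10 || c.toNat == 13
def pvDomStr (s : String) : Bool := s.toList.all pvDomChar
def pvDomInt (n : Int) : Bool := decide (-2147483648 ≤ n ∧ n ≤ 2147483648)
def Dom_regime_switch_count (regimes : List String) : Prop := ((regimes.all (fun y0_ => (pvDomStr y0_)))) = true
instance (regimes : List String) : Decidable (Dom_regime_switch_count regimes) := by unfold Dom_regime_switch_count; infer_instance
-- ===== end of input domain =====

-- B replaces A's stateful previous-tracking pass by counting maximal runs of equal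
-- non-empty regimes with an index-based nested-while scan and returning runs-1 (clamped at 0); objective: alternative.

-- ===== PORT A =====
-- the loop body of A: state = (switches, previous)
def pvStepA (st : Int × Option String) (regime : String) : Int × Option String :=
  if regime = "" then st
  else
    match st.2 with
    | some p => (if regime ≠ p then st.1 + 1 else st.1, some regime)
    | none => (st.1, some regime)

def regime_switch_count (regimes : List String) : Int :=
  (regimes.foldl pvStepA (0, none)).1

-- ===== PORT B =====
-- B's while loops are ported as index recursions; the fuel argument only makes the
-- recursion structural (each loop iteration advances i, so fuel = regimes.length suffices
-- and the value is fuel-independent once fuel ≥ regimes.length - i — proved below).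

-- the inner while loop of B: advance i past elements that are empty or equal to cur
def pvDrop (regimes : List String) (cur : String) : Nat → Nat → Nat
  | 0, i => i
  | fuel + 1, i =>
    if i < regimes.length ∧ (regimes.getD i "" = "" ∨ regimes.getD i "" = cur) then
      pvDrop regimes cur fuel (i + 1)
    else i

-- the outer while loop of B: count maximal runs starting at index i
def pvOuter (regimes : List String) : Nat → Nat → Int
  | 0, _ => 0
  | fuel + 1, i =>
    if i < regimes.length then
      if regimes.getD i "" = "" then pvOuter regimes fuel (i + 1)
      else 1 + pvOuter regimes fuel (pvDrop regimes (regimes.getD i "") regimes.length (i + 1))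
    else 0

def regime_switch_count_alt (regimes : List String) : Int :=
  let runs := pvOuter regimes regimes.length 0
  if runs = 0 then 0 else runs - 1

-- ===== PRECONDITION & SPEC =====
def Spec_regime_switch_count (regimes : List String) (out : Int) : Prop := out = regime_switch_count_alt regimes
instance (regimes : List String) (out : Int) : Decidable (Spec_regime_switch_count regimes out) := by unfold Spec_regime_switch_count; infer_instance

-- ===== CLAIM (what is proved, stated in full; the proofs are below) =====
def Claim_equal_regime_switch_count : Prop := ∀ (regimes : List String), Dom_regime_switch_count regimes → Spec_regime_switch_count regimes (regime_switch_count regimes)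

-- ===== LEMMAS AND PROOFS =====

theorem pvDrop_ge (regimes : List String) (cur : String) :
    ∀ (fuel i : Nat), i ≤ pvDrop regimes cur fuel i := by
  intro fuel
  induction fuel with
  | zero => intro i; exact Nat.le_refl i
  | succ f ih =>
    intro i
    simp only [pvDrop]
    split
    · have := ih (i + 1); omega
    · exact Nat.le_refl i

theorem pvDrop_irrel (regimes : List String) (cur : String) :
    ∀ (f1 f2 i : Nat), regimes.length - i ≤ f1 → regimes.length - i ≤ f2 →
      pvDrop regimes cur f1 i = pvDrop regimes cur f2 i := by
  intro f1
  induction f1 with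
  | zero =>
    intro f2 i h1 _
    cases f2 with
    | zero => rfl
    | succ f2 =>
      show i = pvDrop regimes cur (f2 + 1) i
      simp only [pvDrop]
      rw [if_neg (fun h => by omega)]
  | succ f1 ih =>
    intro f2 i h1 h2
    cases f2 with
    | zero =>
      show pvDrop regimes cur (f1 + 1) i = i
      simp only [pvDrop]
      rw [if_neg (fun h => by omega)]
    | succ f2 =>
      simp only [pvDrop]
      by_cases hc : i < regimes.length ∧ (regimes.getD i "" = "" ∨ regimes.getD i "" = cur)
      · rw [if_pos hc, if_pos hc]
        exact ih f2 (i + 1) (by omega) (by omega)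
      · rw [if_neg hc, if_neg hc]

-- one-step unfolding with the SAME fuel in the recursive call (valid once fuel covers the suffix)
theorem pvDrop_step (regimes : List String) (cur : String) (fuel i : Nat)
    (h : regimes.length - i ≤ fuel) :
    pvDrop regimes cur fuel i
      = if i < regimes.length ∧ (regimes.getD i "" = "" ∨ regimes.getD i "" = cur) then
          pvDrop regimes cur fuel (i + 1)
        else i := by
  cases fuel with
  | zero =>
    show i = _
    rw [if_neg (fun hc => by omega)]
  | succ f =>
    conv_lhs => rw [pvDrop]
    by_cases hc : i < regimes.length ∧ (regimes.getD i "" = "" ∨ regimes.getD i "" = cur)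
    · rw [if_pos hc, if_pos hc]
      exact pvDrop_irrel regimes cur f (f + 1) (i + 1) (by omega) (by omega)
    · rw [if_neg hc, if_neg hc]

theorem pvOuter_irrel (regimes : List String) :
    ∀ (f1 f2 i : Nat), regimes.length - i ≤ f1 → regimes.length - i ≤ f2 →
      pvOuter regimes f1 i = pvOuter regimes f2 i := by
  intro f1
  induction f1 with
  | zero =>
    intro f2 i h1 _
    cases f2 with
    | zero => rfl
    | succ f2 =>
      show (0 : Int) = pvOuter regimes (f2 + 1) i
      simp only [pvOuter]
      rw [if_neg (fun h => by omega)]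
  | succ f1 ih =>
    intro f2 i h1 h2
    cases f2 with
    | zero =>
      show pvOuter regimes (f1 + 1) i = (0 : Int)
      simp only [pvOuter]
      rw [if_neg (fun h => by omega)]
    | succ f2 =>
      simp only [pvOuter]
      by_cases hlt : i < regimes.length
      · rw [if_pos hlt, if_pos hlt]
        by_cases hx : regimes.getD i "" = ""
        · rw [if_pos hx, if_pos hx]
          exact ih f2 (i + 1) (by omega) (by omega)
        · rw [if_neg hx, if_neg hx]
          have hge := pvDrop_ge regimes (regimes.getD i "") regimes.length (i + 1)
          rw [ih f2 (pvDrop regimes (regimes.getD i "") regimes.length (i + 1)) (by omega) (by omega)]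
      · rw [if_neg hlt, if_neg hlt]

theorem pvOuter_step (regimes : List String) (fuel i : Nat)
    (h : regimes.length - i ≤ fuel) :
    pvOuter regimes fuel i
      = if i < regimes.length then
          if regimes.getD i "" = "" then pvOuter regimes fuel (i + 1)
          else 1 + pvOuter regimes fuel (pvDrop regimes (regimes.getD i "") regimes.length (i + 1))
        else 0 := by
  cases fuel with
  | zero =>
    show (0 : Int) = _
    rw [if_neg (fun hc => by omega)]
  | succ f =>
    conv_lhs => rw [pvOuter]
    by_cases hlt : i < regimes.length
    · rw [if_pos hlt, if_pos hlt]
      by_cases hx : regimes.getD i "" = ""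
      · rw [if_pos hx, if_pos hx]
        exact pvOuter_irrel regimes f (f + 1) (i + 1) (by omega) (by omega)
      · rw [if_neg hx, if_neg hx]
        have hge := pvDrop_ge regimes (regimes.getD i "") regimes.length (i + 1)
        rw [pvOuter_irrel regimes f (f + 1) (pvDrop regimes (regimes.getD i "") regimes.length (i + 1)) (by omega) (by omega)]
    · rw [if_neg hlt, if_neg hlt]

theorem pvOuter_nonneg (regimes : List String) :
    ∀ (fuel i : Nat), 0 ≤ pvOuter regimes fuel i := by
  intro fuel
  induction fuel with
  | zero => intro i; exact le_refl 0
  | succ f ih =>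
    intro i
    simp only [pvOuter]
    split
    · split
      · exact ih (i + 1)
      · have := ih (pvDrop regimes (regimes.getD i "") regimes.length (i + 1)); omega
    · exact le_refl 0

theorem drop_cons_getD (regimes : List String) (i : Nat) (h : i < regimes.length) :
    regimes.drop i = regimes.getD i "" :: regimes.drop (i + 1) := by
  rw [List.getD_eq_getElem regimes "" h]
  exact List.drop_eq_getElem_cons h

-- from state (acc, some cur): switches added = number of runs after skipping cur's continuation
theorem pvA_some (regimes : List String) :
    ∀ (k i : Nat), regimes.length - i ≤ k → ∀ (acc : Int) (cur : String), cur ≠ "" →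
      ((regimes.drop i).foldl pvStepA (acc, some cur)).1
        = acc + pvOuter regimes regimes.length (pvDrop regimes cur regimes.length i) := by
  intro k
  induction k with
  | zero =>
    intro i hi acc cur _
    have hdrop : regimes.drop i = [] := List.drop_eq_nil_of_le (by omega)
    have hd : pvDrop regimes cur regimes.length i = i := by
      rw [pvDrop_step regimes cur regimes.length i (Nat.sub_le _ _), if_neg (fun hc => by omega)]
    have ho : pvOuter regimes regimes.length i = 0 := by
      rw [pvOuter_step regimes regimes.length i (Nat.sub_le _ _), if_neg (fun hc => by omega)]
    rw [hdrop, hd, ho]; simp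
  | succ k ih =>
    intro i hi acc cur hcur
    by_cases hlt : i < regimes.length
    · set x := regimes.getD i "" with hxdef
      rw [drop_cons_getD regimes i hlt, List.foldl_cons]
      by_cases hskip : x = "" ∨ x = cur
      · -- element skipped: both sides reduce to index i+1
        have hstep : pvStepA (acc, some cur) x = (acc, some cur) := by
          rcases hskip with hx | hx
          · rw [hx]; simp [pvStepA]
          · rw [hx]; by_cases hc : cur = "" <;> simp [pvStepA, hc]
        have hd : pvDrop regimes cur regimes.length i = pvDrop regimes cur regimes.length (i + 1) := by
          rw [pvDrop_step regimes cur regimes.length i (Nat.sub_le _ _), if_pos ⟨hlt, by rw [← hxdef]; exact hskip⟩]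
        rw [hstep, hd]
        exact ih (i + 1) (by omega) acc cur hcur
      · -- a new run starts at i
        push Not at hskip
        obtain ⟨hxe, hxc⟩ := hskip
        have hstep : pvStepA (acc, some cur) x = (acc + 1, some x) := by
          simp [pvStepA, hxe, hxc]
        have hd : pvDrop regimes cur regimes.length i = i := by
          rw [pvDrop_step regimes cur regimes.length i (Nat.sub_le _ _), if_neg]
          intro hc
          rcases hc.2 with h2 | h2
          · exact hxe (hxdef ▸ h2)
          · exact hxc (hxdef ▸ h2)
        have ho : pvOuter regimes regimes.length i
            = 1 + pvOuter regimes regimes.length (pvDrop regimes x regimes.length (i + 1)) := by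
          rw [pvOuter_step regimes regimes.length i (Nat.sub_le _ _), if_pos hlt,
            if_neg (by rw [← hxdef]; exact hxe), ← hxdef]
        rw [hstep, hd, ho]
        have := ih (i + 1) (by omega) (acc + 1) x hxe
        rw [this]; ring
    · have hdrop : regimes.drop i = [] := List.drop_eq_nil_of_le (by omega)
      have hd : pvDrop regimes cur regimes.length i = i := by
        rw [pvDrop_step regimes cur regimes.length i (Nat.sub_le _ _), if_neg (fun hc => by omega)]
      have ho : pvOuter regimes regimes.length i = 0 := by
        rw [pvOuter_step regimes regimes.length i (Nat.sub_le _ _), if_neg (fun hc => by omega)]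
      rw [hdrop, hd, ho]; simp

-- from state (acc, none): switches added = runs - 1 clamped at 0
theorem pvA_none (regimes : List String) :
    ∀ (k i : Nat), regimes.length - i ≤ k → ∀ (acc : Int),
      ((regimes.drop i).foldl pvStepA (acc, none)).1
        = acc + (if pvOuter regimes regimes.length i = 0 then 0 else pvOuter regimes regimes.length i - 1) := by
  intro k
  induction k with
  | zero =>
    intro i hi acc
    have hdrop : regimes.drop i = [] := List.drop_eq_nil_of_le (by omega)
    have ho : pvOuter regimes regimes.length i = 0 := by
      rw [pvOuter_step regimes regimes.length i (Nat.sub_le _ _), if_neg (fun hc => by omega)]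
    rw [hdrop, ho]; simp
  | succ k ih =>
    intro i hi acc
    by_cases hlt : i < regimes.length
    · set x := regimes.getD i "" with hxdef
      rw [drop_cons_getD regimes i hlt, List.foldl_cons]
      by_cases hxe : x = ""
      · have hstep : pvStepA (acc, (none : Option String)) x = (acc, none) := by
          simp [pvStepA, hxe]
        have ho : pvOuter regimes regimes.length i = pvOuter regimes regimes.length (i + 1) := by
          rw [pvOuter_step regimes regimes.length i (Nat.sub_le _ _), if_pos hlt,
            if_pos (by rw [← hxdef]; exact hxe)]
        rw [hstep, ho]
        exact ih (i + 1) (by omega) acc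
      · have hstep : pvStepA (acc, (none : Option String)) x = (acc, some x) := by
          simp [pvStepA, hxe]
        have ho : pvOuter regimes regimes.length i
            = 1 + pvOuter regimes regimes.length (pvDrop regimes x regimes.length (i + 1)) := by
          rw [pvOuter_step regimes regimes.length i (Nat.sub_le _ _), if_pos hlt,
            if_neg (by rw [← hxdef]; exact hxe), ← hxdef]
        have hmain := pvA_some regimes (regimes.length - (i + 1)) (i + 1) (Nat.le_refl _) acc x hxe
        rw [hstep, hmain, ho]
        have hnn := pvOuter_nonneg regimes regimes.length (pvDrop regimes x regimes.length (i + 1))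
        have hne : ¬ (1 + pvOuter regimes regimes.length (pvDrop regimes x regimes.length (i + 1)) = 0) := by omega
        rw [if_neg hne]
        ring
    · have hdrop : regimes.drop i = [] := List.drop_eq_nil_of_le (by omega)
      have ho : pvOuter regimes regimes.length i = 0 := by
        rw [pvOuter_step regimes regimes.length i (Nat.sub_le _ _), if_neg (fun hc => by omega)]
      rw [hdrop, ho]; simp

-- ===== VERDICT (by name: the statement is the Claim_ definition above) =====
theorem regime_switch_count_spec : Claim_equal_regime_switch_count := by
  intro regimes _
  unfold Spec_regime_switch_count regime_switch_count regime_switch_count_alt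
  have h := pvA_none regimes regimes.length 0 (by omega) 0
  simp only [List.drop_zero] at h
  rw [h]
  simp
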